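-- pv_equiv track=rewrite | github.com/onkcharkupalli1051/pyprograms | ds_nptel/NPTEL_DATA_STRUCTURES_TEST_1/ques8.py | maxaggregate
-- ===== SOURCE A (Python) =====
-- def maxaggregate(l):
--   dic = {}
--   for i in l:
--     if i[0] in dic:
--       dic[i[0]] += i[1]
--     else:
--       dic[i[0]] = i[1]
--   m = max(list(dic.values()))
--   x = []
--   for i in dic:
--     if dic[i] == m:
--       x.append(i)
--   return sorted(x)
-- ===== SOURCE B (Python) =====
-- def maxaggregate(l):
--   keys = sorted({k for k, _ in l})
--   sums = [sum(v for kk, v in l if kk == k) for k in keys]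
--   m = max(sums)
--   return [k for k, s in zip(keys, sums) if s == m]
-- ===== Notes on version B (the rewrite author's own statement) =====
-- stated objective: alternative
-- what changed: drops the dict entirely: B sorts the distinct keys first, computes each key's sum by a direct scan of the input, takes the max of that parallel sums list and selects by zip, so the output is built already sorted with no hash aggregation and no final sort
-- outside the precondition, e.g. on maxaggregate([]): A raises ValueError, B raises ValueError
import Mathlib
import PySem

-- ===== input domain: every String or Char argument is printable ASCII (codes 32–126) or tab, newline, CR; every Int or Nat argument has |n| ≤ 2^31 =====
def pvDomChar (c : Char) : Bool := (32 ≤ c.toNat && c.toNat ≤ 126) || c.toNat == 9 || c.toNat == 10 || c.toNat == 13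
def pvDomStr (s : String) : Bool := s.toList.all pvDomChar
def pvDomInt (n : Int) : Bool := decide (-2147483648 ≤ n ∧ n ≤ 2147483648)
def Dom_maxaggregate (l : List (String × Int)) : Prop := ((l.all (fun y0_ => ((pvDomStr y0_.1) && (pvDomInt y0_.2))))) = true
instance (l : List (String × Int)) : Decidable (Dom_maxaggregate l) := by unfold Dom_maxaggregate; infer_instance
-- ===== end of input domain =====

-- B drops A's dict aggregation: it sorts the distinct keys, computes each key's sum by a
-- direct scan of the input, and selects the max-sum keys from the parallel sums list (alternative).


-- ===== PORT A =====
def maxaggregate (l : List (String × Int)) : List String :=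
  let dic := l.foldl (fun dic i =>
      if dic.contains i.1 then dic.insert i.1 (dic.getD i.1 0 + i.2)
      else dic.insert i.1 i.2) PySem.Dict.empty
  match PySem.List.max? dic.values (fun v => v) with
  | none => []   -- Python: max([]) raises ValueError; excluded by Pre_
  | some m =>
      let x := dic.keys.foldl (fun x i => if dic.getD i 0 == m then x ++ [i] else x) []
      PySem.List.sorted x (fun s => s) false

-- ===== PORT B =====
def maxaggregate_alt (l : List (String × Int)) : List String :=
  let keys := PySem.List.sorted (PySem.Set.ofList (l.map (fun p => p.1))) (fun s => s) false
  let sums := keys.map (fun k => ((l.filter (fun p => p.1 == k)).map (fun p => p.2)).sum)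
  match PySem.List.max? sums (fun v => v) with
  | none => []   -- Python: max([]) raises ValueError; excluded by Pre_
  | some m => ((keys.zip sums).filter (fun p => p.2 == m)).map (fun p => p.1)

-- ===== PRECONDITION & SPEC =====
-- Pre_ excludes only the empty list, on which Python's max([]) raises ValueError in both A and B.
def Pre_maxaggregate (l : List (String × Int)) : Prop := l ≠ []
instance (l : List (String × Int)) : Decidable (Pre_maxaggregate l) := by unfold Pre_maxaggregate; infer_instance
def pvWitness_maxaggregate : (List (String × Int)) := [("a", 1), ("b", 2), ("a", 1)]

def Spec_maxaggregate (l : List (String × Int)) (out : List String) : Prop := out = maxaggregate_alt l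
instance (l : List (String × Int)) (out : List String) : Decidable (Spec_maxaggregate l out) := by unfold Spec_maxaggregate; infer_instance

-- ===== CLAIM (what is proved, stated in full; the proofs are below) =====
def Claim_equal_maxaggregate : Prop := ∀ (l : List (String × Int)), Dom_maxaggregate l → Pre_maxaggregate l → Spec_maxaggregate l (maxaggregate l)

-- ===== LEMMAS AND PROOFS =====

-- keysum k = the total of the values attached to key k in l (B's per-key scan).
def pvKeysum (l : List (String × Int)) (k : String) : Int :=
  ((l.filter (fun p => p.1 == k)).map (fun p => p.2)).sum

-- A's aggregation step, with the insert pulled out of the branch.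
theorem pv_build_eq (l : List (String × Int)) :
    l.foldl (fun dic i =>
      if dic.contains i.1 then dic.insert i.1 (dic.getD i.1 0 + i.2)
      else dic.insert i.1 i.2) PySem.Dict.empty
    = l.foldl (fun dic i => dic.insert i.1 (dic.getD i.1 0 + i.2)) PySem.Dict.empty := by
  apply PySem.List.foldl_congr_mem
  intro acc x _
  by_cases h : acc.contains x.1 = true
  · simp [h]
  · have hc : acc.contains x.1 = false := by simpa using h
    rw [PySem.Dict.getD_of_not_contains (d := acc) (k := x.1) (d0 := 0) hc, zero_add, hc]
    simp

-- The aggregation fold computes exactly the per-key sums.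
theorem pv_getD_agg (l : List (String × Int)) (d : PySem.Dict String Int) (k : String) :
    (l.foldl (fun dic i => dic.insert i.1 (dic.getD i.1 0 + i.2)) d).getD k 0
    = d.getD k 0 + pvKeysum l k := by
  induction l generalizing d with
  | nil => simp [pvKeysum]
  | cons a t ih =>
      rw [List.foldl_cons, ih]
      simp only [pvKeysum, List.filter_cons, PySem.Dict.getD_insert]
      by_cases h : k = a.1
      · subst h
        simp only [BEq.rfl, if_true, List.map_cons, List.sum_cons]
        omega
      · have hne : (a.1 == k) = false := beq_eq_false_iff_ne.mpr (fun e => h e.symm)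
        simp only [if_neg h, hne, Bool.false_eq_true, if_false]

theorem pv_getD (l : List (String × Int)) (k : String) :
    (l.foldl (fun dic i =>
      if dic.contains i.1 then dic.insert i.1 (dic.getD i.1 0 + i.2)
      else dic.insert i.1 i.2) PySem.Dict.empty).getD k 0 = pvKeysum l k := by
  rw [pv_build_eq, pv_getD_agg]
  simp [PySem.Dict.getD_empty]

-- The dict's keys are the distinct keys of l in first-occurrence order.
theorem pv_keys (l : List (String × Int)) :
    (l.foldl (fun dic i =>
      if dic.contains i.1 then dic.insert i.1 (dic.getD i.1 0 + i.2)
      else dic.insert i.1 i.2) PySem.Dict.empty).keys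
    = PySem.Set.ofList (l.map (fun p => p.1)) := by
  rw [pv_build_eq, PySem.Dict.keys_foldl_insert_key]
  rfl

theorem pv_nodup_keys (l : List (String × Int)) :
    (l.foldl (fun dic i =>
      if dic.contains i.1 then dic.insert i.1 (dic.getD i.1 0 + i.2)
      else dic.insert i.1 i.2) PySem.Dict.empty).keys.Nodup := by
  rw [pv_build_eq]
  exact PySem.Dict.nodup_keys_foldl_insert_key l (fun i => i.1) _ _ PySem.Dict.nodup_keys_empty

-- values of a nodup-keyed dict, as getD over its keys.
theorem pv_values_eq (d : PySem.Dict String Int) (h : d.keys.Nodup) :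
    d.values = d.keys.map (fun k => d.getD k 0) := by
  show d.items.map (fun p => p.2) = (d.items.map (fun p => p.1)).map (fun k => d.getD k 0)
  rw [List.map_map]
  apply List.map_congr_left
  intro p hp
  exact (PySem.Dict.getD_of_mem_items (d := d) (k := p.1) (v := p.2) (d0 := 0) (by simpa using hp) h).symm

-- zipping a list with its own map lists the graph pairs.
theorem pv_zip_map {A B : Type} (f : A → B) (xs : List A) :
    xs.zip (xs.map f) = xs.map (fun x => (x, f x)) := by
  induction xs with
  | nil => rfl
  | cons a t ih => simp [ih]

-- max (no key) is invariant under permutation.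
theorem pv_max_perm {xs ys : List Int} (h : xs.Perm ys) :
    PySem.List.max? xs (fun v => v) = PySem.List.max? ys (fun v => v) := by
  cases hx : PySem.List.max? xs (fun v => v) with
  | none =>
      have : xs = [] := (PySem.List.max?_eq_none_iff _ _).mp hx
      subst this
      rw [(PySem.List.max?_eq_none_iff _ _).mpr (List.Perm.nil_eq h).symm]
  | some m =>
      cases hy : PySem.List.max? ys (fun v => v) with
      | none =>
          have : ys = [] := (PySem.List.max?_eq_none_iff _ _).mp hy
          subst this
          have : xs = [] := List.Perm.eq_nil h
          rw [this] at hx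
          simp [PySem.List.max?] at hx
      | some m' =>
          have hm : m ∈ xs := PySem.List.max?_mem hx
          have hm' : m' ∈ ys := PySem.List.max?_mem hy
          have h1 : m' ≤ m := PySem.List.max?_isMax hx m' (h.mem_iff.mpr hm')
          have h2 : m ≤ m' := PySem.List.max?_isMax hy m (h.mem_iff.mp hm)
          exact congrArg some (le_antisymm h2 h1)

-- ===== VERDICT (by name: the statement is the Claim_ definition above) =====
theorem maxaggregate_spec : Claim_equal_maxaggregate := by
  intro l _ hpre
  show maxaggregate l = maxaggregate_alt l
  simp only [maxaggregate, maxaggregate_alt]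
  set dic := l.foldl (fun dic i =>
      if dic.contains i.1 then dic.insert i.1 (dic.getD i.1 0 + i.2)
      else dic.insert i.1 i.2) PySem.Dict.empty with hdic
  set keysB := PySem.List.sorted (PySem.Set.ofList (l.map (fun p => p.1))) (fun s => s) false with hkB
  have hperm : keysB.Perm dic.keys := by
    rw [pv_keys]
    exact PySem.List.sorted_perm _ _ _
  have hgetD : ∀ k, dic.getD k 0 = pvKeysum l k := fun k => pv_getD l k
  have hvals : dic.values = dic.keys.map (fun k => pvKeysum l k) := by
    rw [pv_values_eq dic (pv_nodup_keys l)]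
    exact List.map_congr_left (fun k _ => hgetD k)
  have hsums : keysB.map (fun k => ((l.filter (fun p => p.1 == k)).map (fun p => p.2)).sum)
      = keysB.map (fun k => pvKeysum l k) := rfl
  have hmaxeq : PySem.List.max? dic.values (fun v => v)
      = PySem.List.max? (keysB.map (fun k => ((l.filter (fun p => p.1 == k)).map (fun p => p.2)).sum)) (fun v => v) := by
    rw [hsums, hvals]
    exact pv_max_perm ((hperm.map _).symm)
  rw [← hmaxeq]
  cases hmax : PySem.List.max? dic.values (fun v => v) with
  | none =>
      -- the empty input, excluded by Pre_ (Python raises ValueError there)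
      exfalso
      have hv : dic.values = [] := (PySem.List.max?_eq_none_iff _ _).mp hmax
      have hk : dic.keys = [] := by
        have hlen : dic.keys.length = dic.values.length := by
          simp [PySem.Dict.keys, PySem.Dict.values]
        rw [hv] at hlen
        simpa [List.length_eq_zero_iff] using hlen
      obtain ⟨a, t, rfl⟩ := List.exists_cons_of_ne_nil hpre
      have hmem : a.1 ∈ dic.keys := by
        rw [pv_keys]
        simp [PySem.Set.mem_ofList]
      rw [hk] at hmem
      exact (List.not_mem_nil) hmem
  | some m =>
      dsimp only
      -- A's loop builds the filter of dic.keys …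
      rw [PySem.List.foldl_append_if_eq_filter, List.nil_append]
      -- … and B's zip-comprehension is the filter of keysB.
      have hzip : ((keysB.zip (keysB.map (fun k => ((l.filter (fun p => p.1 == k)).map (fun p => p.2)).sum))).filter
            (fun p => p.2 == m)).map (fun p => p.1)
          = keysB.filter (fun k => pvKeysum l k == m) := by
        rw [hsums, pv_zip_map, List.filter_map, List.map_map]
        simp [Function.comp_def]
      rw [hzip]
      -- the two filters agree pointwise
      have hfa : dic.keys.filter (fun k => dic.getD k 0 == m)
          = dic.keys.filter (fun k => pvKeysum l k == m) := by
        apply List.filter_congr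
        intro k _
        rw [hgetD k]
      rw [hfa]
      -- sorting A's (unsorted) filter gives B's already-sorted filter
      apply PySem.List.sorted_eq_of_perm_of_pairwise_lt
      · exact hperm.filter _
      · exact List.Pairwise.filter _ (PySem.List.sorted_ofList_pairwise_lt _)
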